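-- pv_equiv track=rewrite | github.com/ffrfffff/raster-visualization-plugin | src/utils/pb_instruction.py | _pack_byte_mask
-- ===== SOURCE A (Python) =====
-- from typing import List, Optional, Sequence, Tuple
--
-- def _pack_byte_mask(indices: Sequence[int], primitive_count: int) -> Tuple[int, Tuple[int, ...]]:
--     group_masks = {}
--     for primitive in indices:
--         if primitive >= primitive_count:
--             continue
--         group = primitive // 8
--         group_masks[group] = group_masks.get(group, 0) | (1 << (primitive % 8))
--     byte_mask_bits = 0
--     packed_bytes = []
--     for group in sorted(group_masks):
--         byte_mask_bits |= 1 << group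
--         packed_bytes.append(group_masks[group])
--     words = []
--     for start in range(0, len(packed_bytes), 4):
--         word = 0
--         for offset, byte in enumerate(packed_bytes[start:start + 4]):
--             word |= (byte & 0xff) << (offset * 8)
--         words.append(word)
--     return byte_mask_bits, tuple(words)
-- ===== SOURCE B (Python) =====
-- def _pack_byte_mask(indices, primitive_count):
--     kept = sorted(i for i in indices if i < primitive_count)
--     if not kept:
--         byte_mask_bits, packed = 0, []
--     else:
--         byte_mask_bits = 0
--         packed = []
--         group = kept[0] // 8
--         byte = 1 << (kept[0] % 8)
--         for i in kept[1:]: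
--             g = i // 8
--             if g == group:
--                 byte |= 1 << (i % 8)
--             else:
--                 byte_mask_bits |= 1 << group
--                 packed.append(byte)
--                 group, byte = g, 1 << (i % 8)
--         byte_mask_bits |= 1 << group
--         packed.append(byte)
--     words = []
--     for pos, byte in enumerate(packed):
--         if pos % 4 == 0:
--             words.append(byte)
--         else:
--             words[-1] |= byte << ((pos % 4) * 8)
--     return byte_mask_bits, tuple(words)
-- ===== Notes on version B (the rewrite author's own statement) =====
-- stated objective: alternative
-- what changed: B drops the dict accumulation entirely: it sorts the kept indices once and emits each group's bit-mask by a single run-scan over the sorted list (new packed byte whenever the group changes), and packs words incrementally (append on every 4th byte, OR into the last word otherwise) instead of A's dict + sorted(keys) pass + chunked range/slice word loop; Pre_ excludes only inputs containing a negative index below primitive_count, on which A (and B alike) raises ValueError from a negative shift.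
import Mathlib
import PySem

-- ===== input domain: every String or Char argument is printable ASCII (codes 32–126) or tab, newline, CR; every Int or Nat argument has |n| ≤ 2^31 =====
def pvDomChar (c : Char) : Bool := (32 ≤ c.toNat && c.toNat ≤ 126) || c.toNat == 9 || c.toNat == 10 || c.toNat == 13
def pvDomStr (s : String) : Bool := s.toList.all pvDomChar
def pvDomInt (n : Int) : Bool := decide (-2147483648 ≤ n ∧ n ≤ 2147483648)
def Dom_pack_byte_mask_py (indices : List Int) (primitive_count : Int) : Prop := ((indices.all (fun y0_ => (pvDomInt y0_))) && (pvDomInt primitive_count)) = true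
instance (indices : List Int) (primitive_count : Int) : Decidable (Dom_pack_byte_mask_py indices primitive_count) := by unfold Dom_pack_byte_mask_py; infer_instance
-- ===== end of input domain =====

-- B replaces A's dict-accumulation with one sort of the kept indices followed by a run-scan
-- (alternative decomposition, similar cost); return-value equivalence on Pre_ is proved below.

-- ===== PORT A =====
-- first loop: group_masks accumulated in a dict keyed by primitive // 8
def pbA_dict (indices : List Int) (primitive_count : Int) : PySem.Dict Int Int :=
  indices.foldl
    (fun d primitive =>
      if primitive ≥ primitive_count then d
      else
        let group := PySem.Int.floordiv primitive 8
        d.insert group (PySem.Int.bor (d.getD group 0) ((1 : Int) <<< (PySem.Int.mod primitive 8).toNat)))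
    PySem.Dict.empty

-- second loop: byte_mask_bits and packed_bytes over sorted(group_masks)
def pbA_phase2 (group_masks : PySem.Dict Int Int) : Int × List Int :=
  (PySem.List.sorted group_masks.keys (fun x => x) false).foldl
    (fun (st : Int × List Int) group =>
      (PySem.Int.bor st.1 ((1 : Int) <<< group.toNat), st.2 ++ [group_masks.getD group 0]))
    (0, [])

-- third loop: words over range(0, len(packed_bytes), 4) with an inner enumerate over the slice
def pbA_words (packed_bytes : List Int) : List Int :=
  (PySem.List.pyRange 0 (packed_bytes.length : Int) 4).foldl
    (fun words start =>
      let word := (PySem.List.enumerate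
          (PySem.List.slice packed_bytes (some start) (some (start + 4))) 0).foldl
        (fun word ob => PySem.Int.bor word (PySem.Int.band ob.2 255 <<< (ob.1 * 8).toNat)) 0
      words ++ [word])
    []

def pack_byte_mask_py (indices : List Int) (primitive_count : Int) : Int × List Int :=
  let bp := pbA_phase2 (pbA_dict indices primitive_count)
  (bp.1, pbA_words bp.2)

-- ===== PORT B =====
-- run-scan step over the sorted kept indices; state = (byte_mask_bits, packed, group, byte)
def pbB_step (st : Int × List Int × Int × Int) (i : Int) : Int × List Int × Int × Int :=
  let g := PySem.Int.floordiv i 8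
  if g = st.2.2.1 then
    (st.1, st.2.1, st.2.2.1, PySem.Int.bor st.2.2.2 ((1 : Int) <<< (PySem.Int.mod i 8).toNat))
  else
    (PySem.Int.bor st.1 ((1 : Int) <<< st.2.2.1.toNat), st.2.1 ++ [st.2.2.2],
      g, (1 : Int) <<< (PySem.Int.mod i 8).toNat)

-- 'if not kept: … else: run-scan with a final flush'
def pbB_phase1 (kept : List Int) : Int × List Int :=
  match kept with
  | [] => (0, [])
  | k0 :: rest =>
    let st := rest.foldl pbB_step
      (0, [], PySem.Int.floordiv k0 8, (1 : Int) <<< (PySem.Int.mod k0 8).toNat)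
    (PySem.Int.bor st.1 ((1 : Int) <<< st.2.2.1.toNat), st.2.1 ++ [st.2.2.2])

-- incremental word packing: append on pos % 4 == 0, OR into words[-1] otherwise
def pbB_words (packed : List Int) : List Int :=
  (PySem.List.enumerate packed 0).foldl
    (fun ws pb =>
      if PySem.Int.mod pb.1 4 = 0 then ws ++ [pb.2]
      else ws.dropLast ++ [PySem.Int.bor (ws.getLastD 0) ((pb.2 : Int) <<< ((PySem.Int.mod pb.1 4).toNat * 8))])
    []

def pack_byte_mask_py_alt (indices : List Int) (primitive_count : Int) : Int × List Int :=
  let kept := PySem.List.sorted (indices.filter (fun i => decide (i < primitive_count))) (fun x => x) false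
  let bp := pbB_phase1 kept
  (bp.1, pbB_words bp.2)

-- ===== PRECONDITION & SPEC =====
-- Pre_ excludes exactly the inputs with a negative index below primitive_count: there the Python A
-- raises ValueError ('1 << group' with negative group), and the Python B raises the same way.
def Pre_pack_byte_mask_py (indices : List Int) (primitive_count : Int) : Prop :=
  ∀ i ∈ indices, i < primitive_count → 0 ≤ i
instance (indices : List Int) (primitive_count : Int) : Decidable (Pre_pack_byte_mask_py indices primitive_count) := by
  unfold Pre_pack_byte_mask_py; infer_instance

def pvWitness_pack_byte_mask_py : List Int × Int := ([9, 0, 3, 70, 9, 31], 64)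

def Spec_pack_byte_mask_py (indices : List Int) (primitive_count : Int) (out : Int × List Int) : Prop :=
  out = pack_byte_mask_py_alt indices primitive_count
instance (indices : List Int) (primitive_count : Int) (out : Int × List Int) : Decidable (Spec_pack_byte_mask_py indices primitive_count out) := by
  unfold Spec_pack_byte_mask_py; infer_instance

-- ===== CLAIM (what is proved, stated in full; the proofs are below) =====
def Claim_equal_pack_byte_mask_py : Prop := ∀ (indices : List Int) (primitive_count : Int), Dom_pack_byte_mask_py indices primitive_count → Pre_pack_byte_mask_py indices primitive_count → Spec_pack_byte_mask_py indices primitive_count (pack_byte_mask_py indices primitive_count)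

-- ===== LEMMAS AND PROOFS =====

-- canonical description shared by both ports
def pvGp (i : Int) : Int := PySem.Int.floordiv i 8
def pvBitN (i : Int) : Nat := 1 <<< (PySem.Int.mod i 8).toNat
def pvBitI (i : Int) : Int := (1 : Int) <<< (PySem.Int.mod i 8).toNat
def pvMn (l : List Int) (g : Int) : Nat :=
  (l.filter (fun i => pvGp i = g)).foldl (fun a i => a ||| pvBitN i) 0
def pvG (l : List Int) : List Int :=
  PySem.List.sorted (PySem.Set.ofList (l.map pvGp)) (fun x => x) false
def pvBits (L : List Int) : Int :=
  L.foldl (fun a k => PySem.Int.bor a ((1 : Int) <<< k.toNat)) 0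
def pvCanPacked (l : List Int) : List Int := (pvG l).map (fun k => ((pvMn l k : Nat) : Int))
def pvWordA (c : List Int) : Int :=
  (PySem.List.enumerate c 0).foldl
    (fun word ob => PySem.Int.bor word (PySem.Int.band ob.2 255 <<< (ob.1 * 8).toNat)) 0

theorem pvBitI_eq (i : Int) : pvBitI i = ((pvBitN i : Nat) : Int) := by
  simp [pvBitI, pvBitN, Int.shiftLeft_eq, Nat.shiftLeft_eq]

theorem pvBitN_lt (i : Int) : pvBitN i < 256 := by
  have h1 : PySem.Int.mod i 8 < 8 := PySem.Int.mod_lt i (by norm_num)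
  have h0 : 0 ≤ PySem.Int.mod i 8 := PySem.Int.mod_nonneg i (by norm_num)
  have hk : (PySem.Int.mod i 8).toNat < 8 := by omega
  have h2 : pvBitN i = 2 ^ (PySem.Int.mod i 8).toNat := by simp [pvBitN, Nat.shiftLeft_eq]
  have h3 : (2 : Nat) ^ (PySem.Int.mod i 8).toNat ≤ 2 ^ 7 :=
    Nat.pow_le_pow_right (by norm_num) (by omega)
  omega

theorem pvOrFold_lt (l : List Int) (a : Nat) (ha : a < 256) :
    l.foldl (fun a i => a ||| pvBitN i) a < 256 := by
  induction l generalizing a with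
  | nil => simpa
  | cons x t ih =>
    refine ih _ ?_
    have hx := pvBitN_lt x
    have h256 : (256 : Nat) = 2 ^ 8 := by norm_num
    exact h256 ▸ Nat.or_lt_two_pow (h256 ▸ ha) (h256 ▸ hx)

theorem pvMn_lt (l : List Int) (g : Int) : pvMn l g < 256 := by
  unfold pvMn; exact pvOrFold_lt _ 0 (by norm_num)

theorem pvGp_mono {a b : Int} (h : a ≤ b) : pvGp a ≤ pvGp b := by
  unfold pvGp
  rw [PySem.Int.floordiv_eq_ediv_of_pos (by norm_num),
    PySem.Int.floordiv_eq_ediv_of_pos (by norm_num)]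
  exact Int.ediv_le_ediv (by norm_num) h

-- the guarded first loop is the same fold over the filtered list
def pvDstep (d : PySem.Dict Int Int) (i : Int) : PySem.Dict Int Int :=
  d.insert (pvGp i) (PySem.Int.bor (d.getD (pvGp i) 0) (pvBitI i))

theorem pbA_dict_eq_filter (indices : List Int) (pc : Int) :
    pbA_dict indices pc
      = (indices.filter (fun i => decide (i < pc))).foldl pvDstep PySem.Dict.empty := by
  rw [List.foldl_filter]
  unfold pbA_dict
  congr 1
  funext d x
  by_cases h : x < pc
  · simp [h, not_le.mpr h, pvDstep, pvGp, pvBitI]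
  · simp [h, not_lt.mp h]

-- A's dict characterised: keys in first-occurrence order = set of groups, values = group masks
theorem dict_fold_spec (m : List Int) :
    (m.foldl pvDstep PySem.Dict.empty).keys = PySem.Set.ofList (m.map pvGp)
      ∧ ∀ k, (m.foldl pvDstep PySem.Dict.empty).getD k 0 = ((pvMn m k : Nat) : Int) := by
  induction m using List.reverseRecOn with
  | nil =>
    constructor
    · simp [PySem.Dict.keys_empty, PySem.Set.ofList]
    · intro k; simp [PySem.Dict.getD_empty, pvMn]
  | append_singleton m x ih =>
    obtain ⟨hk, hg⟩ := ih
    have hfold : (m ++ [x]).foldl pvDstep PySem.Dict.empty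
        = pvDstep (m.foldl pvDstep PySem.Dict.empty) x := by
      rw [List.foldl_append]; rfl
    set d := m.foldl pvDstep PySem.Dict.empty with hd
    have hmemiff : (d.contains (pvGp x) = true) ↔ pvGp x ∈ m.map pvGp := by
      rw [PySem.Dict.contains_iff_mem_keys, hk, PySem.Set.mem_ofList]
    have hMn : ∀ k, pvMn (m ++ [x]) k
        = if k = pvGp x then pvMn m k ||| pvBitN x else pvMn m k := by
      intro k
      unfold pvMn
      rw [List.filter_append]
      by_cases he : pvGp x = k
      · simp only [List.filter_cons, List.filter_nil, he, decide_true, if_true]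
        rw [List.foldl_append]
        rfl
      · simp only [List.filter_cons, List.filter_nil, decide_eq_true_eq, he, if_false]
        rw [List.append_nil, if_neg (fun hh => he hh.symm)]
    constructor
    · rw [hfold]
      show (d.insert (pvGp x) _).keys = _
      rw [List.map_append, List.map_singleton, PySem.Set.ofList_append_singleton]
      by_cases hc : d.contains (pvGp x) = true
      · rw [PySem.Dict.keys_insert_of_contains d _ hc, hk,
          PySem.Set.add_of_mem ((PySem.Set.mem_ofList _ _).mpr (hmemiff.mp hc))]
      · have hc' : d.contains (pvGp x) = false := by
          cases hcc : d.contains (pvGp x)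
          · rfl
          · exact absurd hcc hc
        rw [PySem.Dict.keys_insert_of_not_contains d _ hc', hk,
          PySem.Set.add_of_not_mem
            (fun hmem => hc (hmemiff.mpr ((PySem.Set.mem_ofList _ _).mp hmem)))]
    · intro k
      rw [hfold]
      show (d.insert (pvGp x) (PySem.Int.bor (d.getD (pvGp x) 0) (pvBitI x))).getD k 0 = _
      rw [PySem.Dict.getD_insert, hMn]
      by_cases he : k = pvGp x
      · rw [if_pos he, if_pos he, hg, pvBitI_eq, PySem.Int.bor_natCast, he]
      · rw [if_neg he, if_neg he, hg]

-- A's second loop splits into the bits fold and the mask map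
theorem foldl_pair_split (L : List Int) (f : Int → Int) (b0 : Int) (p0 : List Int) :
    L.foldl (fun st g => (PySem.Int.bor st.1 ((1 : Int) <<< g.toNat), st.2 ++ [f g])) (b0, p0)
      = (L.foldl (fun a k => PySem.Int.bor a ((1 : Int) <<< k.toNat)) b0, p0 ++ L.map f) := by
  induction L generalizing b0 p0 with
  | nil => simp
  | cons x t ih =>
    rw [List.foldl_cons, List.foldl_cons, ih]
    simp

theorem pbA_phase2_eq (d : PySem.Dict Int Int) :
    pbA_phase2 d = (pvBits (PySem.List.sorted d.keys (fun x => x) false),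
      (PySem.List.sorted d.keys (fun x => x) false).map (fun k => d.getD k 0)) := by
  unfold pbA_phase2 pvBits
  exact foldl_pair_split _ _ 0 []

theorem pbA_phase12 (indices : List Int) (primitive_count : Int) :
    pbA_phase2 (pbA_dict indices primitive_count)
      = (pvBits (pvG (indices.filter (fun i => decide (i < primitive_count)))),
         pvCanPacked (indices.filter (fun i => decide (i < primitive_count)))) := by
  obtain ⟨hk, hg⟩ := dict_fold_spec (indices.filter (fun i => decide (i < primitive_count)))
  rw [pbA_dict_eq_filter, pbA_phase2_eq, hk]
  unfold pvG pvCanPacked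
  simp only [hg]
  rfl

-- canonical form is invariant under permutation of the kept list
theorem pvCan_perm {l l' : List Int} (h : l.Perm l') :
    pvG l = pvG l' ∧ ∀ k, pvMn l k = pvMn l' k := by
  constructor
  · unfold pvG
    refine PySem.List.sorted_eq_sorted_of_perm _ _ _ (fun a b hab => hab) ?_
    rw [List.perm_ext_iff_of_nodup (PySem.Set.nodup_ofList _) (PySem.Set.nodup_ofList _)]
    intro a
    rw [PySem.Set.mem_ofList, PySem.Set.mem_ofList]
    exact (h.map pvGp).mem_iff
  · intro k
    unfold pvMn
    exact List.Perm.foldl_eq (rcomm := ⟨fun b a1 a2 => by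
      rw [Nat.lor_assoc, Nat.lor_assoc, Nat.lor_comm (pvBitN a1) (pvBitN a2)]⟩)
      (h.filter _) 0

theorem pvMn_append (t : List Int) (x k : Int) :
    pvMn (t ++ [x]) k = if k = pvGp x then pvMn t k ||| pvBitN x else pvMn t k := by
  unfold pvMn
  rw [List.filter_append]
  by_cases he : pvGp x = k
  · simp only [List.filter_cons, List.filter_nil, he, decide_true, if_true]
    rw [List.foldl_append]
    rfl
  · simp only [List.filter_cons, List.filter_nil, decide_eq_true_eq, he, if_false]
    rw [List.append_nil, if_neg (fun hh => he hh.symm)]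

theorem pvBits_append (K : List Int) (g : Int) :
    pvBits (K ++ [g]) = PySem.Int.bor (pvBits K) ((1 : Int) <<< (g.toNat : Int)) := by
  unfold pvBits
  rw [List.foldl_append]
  rfl

theorem pvG_pairwise_lt (l : List Int) : (pvG l).Pairwise (· < ·) :=
  PySem.List.sorted_ofList_pairwise_lt _

-- B's run-scan invariant, by induction along the sorted list from the right
theorem pbB_scan_inv (r : List Int) (k0 : Int) (hs : (k0 :: r).Pairwise (· ≤ ·)) :
    ∃ K g,
      pvG (k0 :: r) = K ++ [g] ∧
      (∀ i ∈ (k0 :: r), pvGp i ≤ g) ∧ g ∈ (k0 :: r).map pvGp ∧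
      r.foldl pbB_step (0, [], PySem.Int.floordiv k0 8, (1 : Int) <<< (PySem.Int.mod k0 8).toNat)
        = (pvBits K, K.map (fun k => ((pvMn (k0 :: r) k : Nat) : Int)), g,
           ((pvMn (k0 :: r) g : Nat) : Int)) := by
  induction r using List.reverseRecOn with
  | nil =>
    have hm : pvMn [k0] (pvGp k0) = pvBitN k0 := by
      unfold pvMn
      simp [Nat.zero_or]
    refine ⟨[], pvGp k0, ?_, ?_, ?_, ?_⟩
    · rw [List.nil_append]
      rfl
    · intro i hi
      rw [List.mem_singleton.mp hi]
    · simp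
    · rw [List.foldl_nil]
      rw [hm, ← pvBitI_eq]
      rfl
  | append_singleton r x ih =>
    have hsplit : ((k0 :: r) ++ [x]).Pairwise (· ≤ ·) := by simpa using hs
    rw [List.pairwise_append] at hsplit
    obtain ⟨h1, -, hle⟩ := hsplit
    obtain ⟨K, g, hG, hub, hmem, hfold⟩ := ih h1
    have hle' : ∀ a ∈ k0 :: r, a ≤ x := fun a ha => hle a ha x (by simp)
    obtain ⟨i0, hi0mem, hi0⟩ := List.mem_map.mp hmem
    have hgle : g ≤ pvGp x := hi0 ▸ pvGp_mono (hle' i0 hi0mem)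
    have hKlt : ∀ k ∈ K, k < g := by
      have hp : (K ++ [g]).Pairwise (· < ·) := hG ▸ pvG_pairwise_lt (k0 :: r)
      rw [List.pairwise_append] at hp
      exact fun k hk => hp.2.2 k hk g (by simp)
    have hca : k0 :: (r ++ [x]) = (k0 :: r) ++ [x] := by simp
    rw [List.foldl_append, hfold, List.foldl_cons, List.foldl_nil]
    simp only [pbB_step]
    rw [show PySem.Int.floordiv x 8 = pvGp x from rfl]
    by_cases hcase : pvGp x = g
    · rw [if_pos hcase]
      refine ⟨K, g, ?_, ?_, ?_, ?_⟩
      · have hGeq : pvG (k0 :: (r ++ [x])) = pvG (k0 :: r) := by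
          unfold pvG
          rw [hca, List.map_append, List.map_singleton, PySem.Set.ofList_append_singleton,
            PySem.Set.add_of_mem ((PySem.Set.mem_ofList _ _).mpr (hcase ▸ hmem))]
        rw [hGeq, hG]
      · intro i hi
        rw [hca] at hi
        rcases List.mem_append.mp hi with h | h
        · exact hub i h
        · rw [List.mem_singleton.mp h]
          exact le_of_eq hcase
      · rw [hca, List.map_append]
        exact List.mem_append.mpr (Or.inl hmem)
      · rw [hca]
        simp only [pvMn_append]
        refine congrArg₂ Prod.mk rfl (congrArg₂ Prod.mk ?_ (congrArg₂ Prod.mk rfl ?_))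
        · refine List.map_congr_left (fun k hk => ?_)
          rw [if_neg (fun h => (ne_of_lt (hKlt k hk)) (h.trans hcase))]
        · rw [if_pos hcase.symm, ← PySem.Int.bor_natCast, ← pvBitI_eq]
          rfl
    · rw [if_neg hcase]
      have hglt : g < pvGp x := lt_of_le_of_ne hgle (fun h => hcase h.symm)
      have hubx : ∀ i ∈ k0 :: r, pvGp i < pvGp x := fun i hi => lt_of_le_of_lt (hub i hi) hglt
      have hnotin : pvGp x ∉ PySem.Set.ofList ((k0 :: r).map pvGp) := by
        intro hin
        obtain ⟨j, hj, hgj⟩ := List.mem_map.mp ((PySem.Set.mem_ofList _ _).mp hin)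
        exact absurd (hgj ▸ hubx j hj) (lt_irrefl _)
      have hMn0 : pvMn (k0 :: r) (pvGp x) = 0 := by
        unfold pvMn
        rw [List.filter_eq_nil_iff.mpr (fun i hi => by
          simp only [decide_eq_true_eq]
          exact ne_of_lt (hubx i hi))]
        rfl
      have hGnew : pvG (k0 :: (r ++ [x])) = (K ++ [g]) ++ [pvGp x] := by
        unfold pvG
        rw [hca, List.map_append, List.map_singleton, PySem.Set.ofList_append_singleton,
          PySem.Set.add_of_not_mem hnotin]
        refine PySem.List.sorted_eq_of_perm_of_pairwise_lt _ _ _ ?_ ?_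
        · exact (hG ▸ PySem.List.sorted_perm _ _ _ : (K ++ [g]).Perm _).append_right [pvGp x]
        · rw [List.pairwise_append]
          refine ⟨hG ▸ pvG_pairwise_lt (k0 :: r), List.pairwise_singleton _ _, ?_⟩
          intro a ha b hb
          rw [List.mem_singleton.mp hb]
          rcases List.mem_append.mp ha with h | h
          · exact lt_trans (hKlt a h) hglt
          · rw [List.mem_singleton.mp h]
            exact hglt
      refine ⟨K ++ [g], pvGp x, hGnew, ?_, ?_, ?_⟩
      · intro i hi
        rw [hca] at hi
        rcases List.mem_append.mp hi with h | h
        · exact le_of_lt (hubx i h)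
        · rw [List.mem_singleton.mp h]
      · rw [hca, List.map_append, List.map_singleton]
        exact List.mem_append.mpr (Or.inr (by simp))
      · rw [hca]
        simp only [pvMn_append]
        refine congrArg₂ Prod.mk ?_ (congrArg₂ Prod.mk ?_ (congrArg₂ Prod.mk rfl ?_))
        · rw [pvBits_append, Int.shiftLeft_natCast_right]
        · rw [List.map_append, List.map_singleton]
          refine congrArg₂ (· ++ ·) ?_ ?_
          · refine List.map_congr_left (fun k hk => ?_)
            rw [if_neg (fun h => absurd (h ▸ lt_trans (hKlt k hk) hglt) (lt_irrefl _))]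
          · rw [if_neg (fun h => absurd (h ▸ hglt) (lt_irrefl _))]
        · rw [if_pos trivial, hMn0, Nat.zero_or, ← pvBitI_eq]
          rfl

theorem pbB_phase1_eq (s : List Int) (hs : s.Pairwise (· ≤ ·)) :
    pbB_phase1 s = (pvBits (pvG s), pvCanPacked s) := by
  cases s with
  | nil => rfl
  | cons k0 r =>
    obtain ⟨K, g, hG, -, -, hfold⟩ := pbB_scan_inv r k0 hs
    simp only [pbB_phase1]
    rw [hfold]
    unfold pvCanPacked
    rw [hG, pvBits_append, List.map_append, List.map_singleton, Int.shiftLeft_natCast_right]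

-- both word loops equal the chunkwise closed form
theorem pbA_words_closed (packed : List Int) :
    pbA_words packed
      = (List.range ((packed.length + 3) / 4)).map
          (fun w => pvWordA ((packed.drop (4 * w)).take 4)) := by
  show (PySem.List.pyRange 0 (packed.length : Int) 4).foldl
      (fun words start =>
        words ++ [pvWordA (PySem.List.slice packed (some start) (some (start + 4)))]) []
    = _
  rw [PySem.List.foldl_append_singleton_eq_map, List.nil_append,
    PySem.List.pyRange_of_pos 0 (packed.length : Int) (by norm_num), List.map_map]
  have hcnt : (if (0:Int) < (packed.length : Int)
        then (((packed.length : Int) - 0 + 4 - 1) / 4).toNat else 0)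
      = (packed.length + 3) / 4 := by
    by_cases h : 0 < packed.length
    · rw [if_pos (by exact_mod_cast h)]
      omega
    · rw [if_neg (by exact_mod_cast h)]
      omega
  rw [hcnt]
  refine List.map_congr_left (fun k hk => ?_)
  show pvWordA (PySem.List.slice packed (some ((0:Int) + 4 * (k:Int)))
      (some ((0:Int) + 4 * (k:Int) + 4))) = _
  have harg1 : (0:Int) + 4 * (k:Int) = ((4 * k : Nat) : Int) := by push_cast; ring
  rw [harg1]
  have hs4 := PySem.List.slice_natCast_add packed (4 * k) 4
  rw [show ((4:Nat):Int) = (4:Int) from by norm_num] at hs4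
  rw [hs4]

theorem pv_band255 (x : Int) (m : Nat) (hx : x = (m : Int)) (hm : m < 256) :
    PySem.Int.band x 255 = x := by
  subst hx
  rw [show (255:Int) = ((255:Nat):Int) from by norm_num, PySem.Int.band_natCast]
  have h255 : (255:Nat) = 2 ^ 8 - 1 := by norm_num
  rw [h255, Nat.and_two_pow_sub_one_eq_mod, Nat.mod_eq_of_lt (by omega)]

theorem pvWordA_append (c : List Int) (x : Int) :
    pvWordA (c ++ [x])
      = PySem.Int.bor (pvWordA c) (PySem.Int.band x 255 <<< (c.length * 8)) := by
  unfold pvWordA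
  rw [PySem.List.enumerate_append, List.foldl_append, PySem.List.enumerate_cons,
    PySem.List.enumerate_nil, List.foldl_cons, List.foldl_nil]
  congr 1
  simp only [zero_add]
  rw [show (((c.length:Int)) * 8).toNat = c.length * 8 from by omega,
    Int.shiftLeft_natCast_right]

theorem pvWordA_single (x : Int) (m : Nat) (hx : x = (m : Int)) (hm : m < 256) :
    pvWordA [x] = x := by
  have h := pvWordA_append [] x
  rw [List.nil_append] at h
  rw [h, pv_band255 x m hx hm]
  rw [show (pvWordA [] : Int) = 0 from rfl, show ([] : List Int).length * 8 = 0 from rfl]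
  rw [PySem.Int.bor_comm, PySem.Int.bor_zero]
  simp [Int.shiftLeft_eq]

theorem pbB_words_closed (packed : List Int)
    (hb : ∀ b ∈ packed, ∃ m : Nat, b = (m : Int) ∧ m < 256) :
    pbB_words packed
      = (List.range ((packed.length + 3) / 4)).map
          (fun w => pvWordA ((packed.drop (4 * w)).take 4)) := by
  induction packed using List.reverseRecOn with
  | nil => rfl
  | append_singleton p x ih =>
    have hbp : ∀ b ∈ p, ∃ m : Nat, b = (m : Int) ∧ m < 256 :=
      fun b hbm => hb b (List.mem_append_left _ hbm)
    obtain ⟨mx, hmx, hmxlt⟩ := hb x (by simp)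
    have hprev := ih hbp
    unfold pbB_words at hprev ⊢
    rw [PySem.List.enumerate_append, List.foldl_append, hprev, PySem.List.enumerate_cons,
      PySem.List.enumerate_nil, List.foldl_cons, List.foldl_nil]
    have hmod : PySem.Int.mod ((0:Int) + (p.length : Int)) 4 = ((p.length % 4 : Nat) : Int) := by
      rw [zero_add, PySem.Int.mod_eq_emod_of_pos (by norm_num)]
      omega
    rw [List.length_append, List.length_singleton]
    by_cases hn4 : p.length % 4 = 0
    · rw [if_pos (by rw [hmod, hn4]; rfl)]
      have hm' : (p.length + 1 + 3) / 4 = (p.length + 3) / 4 + 1 := by omega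
      rw [hm', List.range_succ, List.map_append, List.map_singleton]
      congr 1
      · refine List.map_congr_left (fun w hw => ?_)
        have hwlt : w < (p.length + 3) / 4 := List.mem_range.mp hw
        have hwle : 4 * w + 4 ≤ p.length := by omega
        rw [List.drop_append_of_le_length (by omega),
          List.take_append_of_le_length (by rw [List.length_drop]; omega)]
      · have h2 : (p ++ [x]).drop (4 * ((p.length + 3) / 4)) = [x] := by
          rw [show 4 * ((p.length + 3) / 4) = p.length by omega,
            List.drop_append_of_le_length (le_refl _), List.drop_length, List.nil_append]
        rw [h2, show List.take 4 [x] = [x] from rfl, pvWordA_single x mx hmx hmxlt]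
    · rw [if_neg (by rw [hmod]; intro hcon; exact hn4 (by exact_mod_cast hcon))]
      have hm1 : 1 ≤ (p.length + 3) / 4 := by omega
      have hm' : (p.length + 1 + 3) / 4 = (p.length + 3) / 4 := by omega
      have hrange : List.range ((p.length + 3) / 4)
          = List.range ((p.length + 3) / 4 - 1) ++ [(p.length + 3) / 4 - 1] := by
        conv_lhs => rw [show (p.length + 3) / 4 = ((p.length + 3) / 4 - 1) + 1 by omega]
        rw [List.range_succ]
      rw [hrange, List.map_append, List.map_singleton, List.dropLast_concat,
        List.getLastD_concat, hm', hrange, List.map_append, List.map_singleton]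
      have h4le : 4 * ((p.length + 3) / 4 - 1) ≤ p.length := by omega
      congr 1
      · refine List.map_congr_left (fun w hw => ?_)
        have hwlt : w < (p.length + 3) / 4 - 1 := List.mem_range.mp hw
        have hwle : 4 * w + 4 ≤ p.length := by omega
        rw [List.drop_append_of_le_length (by omega),
          List.take_append_of_le_length (by rw [List.length_drop]; omega)]
      · have hclen : (p.drop (4 * ((p.length + 3) / 4 - 1))).length = p.length % 4 := by
          rw [List.length_drop]; omega
        have hchunk : (p ++ [x]).drop (4 * ((p.length + 3) / 4 - 1))
            = p.drop (4 * ((p.length + 3) / 4 - 1)) ++ [x] :=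
          List.drop_append_of_le_length h4le
        rw [hchunk, List.take_of_length_le (by
            simp only [List.length_drop]; omega),
          List.take_of_length_le (by
            simp only [List.length_append, List.length_drop, List.length_singleton]; omega),
          pvWordA_append, pv_band255 x mx hmx hmxlt, hclen, hmod, Int.toNat_natCast]

-- ===== VERDICT (by name: the statement is the Claim_ definition above) =====
theorem pack_byte_mask_py_spec : Claim_equal_pack_byte_mask_py := by
  unfold Claim_equal_pack_byte_mask_py
  intro indices primitive_count _hDom _hPre
  unfold Spec_pack_byte_mask_py
  have hperm : (PySem.List.sorted (indices.filter (fun i => decide (i < primitive_count)))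
      (fun x => x) false).Perm (indices.filter (fun i => decide (i < primitive_count))) :=
    PySem.List.sorted_perm _ _ _
  obtain ⟨hGp, hMp⟩ := pvCan_perm hperm
  have hpair : (PySem.List.sorted (indices.filter (fun i => decide (i < primitive_count)))
      (fun x => x) false).Pairwise (· ≤ ·) :=
    PySem.List.sorted_pairwise _ _
  have hA : pack_byte_mask_py indices primitive_count
      = (pvBits (pvG (indices.filter (fun i => decide (i < primitive_count)))),
         pbA_words (pvCanPacked (indices.filter (fun i => decide (i < primitive_count))))) := by
    unfold pack_byte_mask_py
    rw [pbA_phase12]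
  have hB : pack_byte_mask_py_alt indices primitive_count
      = (pvBits (pvG (PySem.List.sorted (indices.filter (fun i => decide (i < primitive_count)))
          (fun x => x) false)),
         pbB_words (pvCanPacked (PySem.List.sorted
          (indices.filter (fun i => decide (i < primitive_count))) (fun x => x) false))) := by
    unfold pack_byte_mask_py_alt
    show ((pbB_phase1 (PySem.List.sorted (indices.filter (fun i => decide (i < primitive_count)))
        (fun x => x) false)).1,
      pbB_words (pbB_phase1 (PySem.List.sorted (indices.filter
        (fun i => decide (i < primitive_count))) (fun x => x) false)).2) = _
    rw [pbB_phase1_eq _ hpair]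
  have hCan : pvCanPacked (indices.filter (fun i => decide (i < primitive_count)))
      = pvCanPacked (PySem.List.sorted (indices.filter (fun i => decide (i < primitive_count)))
          (fun x => x) false) := by
    unfold pvCanPacked
    rw [← hGp]
    refine List.map_congr_left (fun k _ => ?_)
    rw [hMp]
  have hbound : ∀ b ∈ pvCanPacked (PySem.List.sorted
      (indices.filter (fun i => decide (i < primitive_count))) (fun x => x) false),
      ∃ m : Nat, b = (m : Int) ∧ m < 256 := by
    intro b hbm
    obtain ⟨k, _, hkb⟩ := List.mem_map.mp hbm
    exact ⟨pvMn _ k, hkb.symm, pvMn_lt _ k⟩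
  rw [hA, hB, ← hGp, hCan, pbA_words_closed, pbB_words_closed _ hbound]
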